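-- pv_equiv track=rewrite | github.com/yeonupark/Algorithm | leetcode/valid_perfect_square.py | isPerfectSquare
-- ===== SOURCE A (Python) =====
-- def isPerfectSquare(num: int) -> bool:
--
--     top = num//2 + 1
--     bottom = 0
--
--     while bottom <= top:
--
--         mid = (top+bottom) // 2
--
--         if mid*mid == num:
--           return True
--
--         elif mid*mid > num:
--             top = mid - 1
--
--         else:
--             bottom = mid + 1
--
--     return False
-- ===== SOURCE B (Python) =====
-- def isPerfectSquare(num: int) -> bool:
--     i = 1
--     while num > 0:
--         num -= i
--         i += 2
--     return num == 0
-- ===== Notes on version B (the rewrite author's own statement) =====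
-- stated objective: simpler
-- what changed: Replaced the binary search over the half-range by the sum-of-consecutive-odd-numbers identity: repeatedly subtract the next odd number from num until it is nonpositive and return whether num ended at exactly zero.
import Mathlib
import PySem

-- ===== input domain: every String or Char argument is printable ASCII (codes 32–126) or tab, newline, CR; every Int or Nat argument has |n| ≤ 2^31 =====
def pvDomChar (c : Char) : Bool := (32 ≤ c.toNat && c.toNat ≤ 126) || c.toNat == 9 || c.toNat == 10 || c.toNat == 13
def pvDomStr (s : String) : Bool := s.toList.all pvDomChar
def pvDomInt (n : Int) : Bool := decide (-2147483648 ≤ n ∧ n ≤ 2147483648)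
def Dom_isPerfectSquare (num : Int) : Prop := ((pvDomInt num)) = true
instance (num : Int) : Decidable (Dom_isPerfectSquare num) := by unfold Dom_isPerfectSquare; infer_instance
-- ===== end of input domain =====

-- B replaces A's binary search by the consecutive-odd-numbers identity (simpler, not faster).


-- ===== PORT A =====
-- the while loop of A: state (top, bottom)
def pvALoop (num top bottom : Int) : Bool :=
  if _h : bottom ≤ top then
    let mid := PySem.Int.floordiv (top + bottom) 2
    if mid * mid == num then true
    else if mid * mid > num then pvALoop num (mid - 1) bottom
    else pvALoop num top (mid + 1)
  else false
termination_by (top + 1 - bottom).toNat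
decreasing_by
  · have hmid := PySem.Int.floordiv_two_mid_bounds (lo := bottom) (hi := top) _h
    rw [Int.add_comm bottom top] at hmid
    omega
  · have hmid := PySem.Int.floordiv_two_mid_bounds (lo := bottom) (hi := top) _h
    rw [Int.add_comm bottom top] at hmid
    omega

def isPerfectSquare (num : Int) : Bool :=
  pvALoop num (PySem.Int.floordiv num 2 + 1) 0

-- ===== PORT B =====
-- the while loop of B: state (num, i); the hypothesis 1 ≤ i is carried only for termination
def pvBLoop (num i : Int) (hi : 1 ≤ i) : Bool :=
  if _h : num > 0 then pvBLoop (num - i) (i + 2) (by omega)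
  else num == 0
termination_by num.toNat
decreasing_by omega

def isPerfectSquare_alt (num : Int) : Bool :=
  pvBLoop num 1 (by norm_num)

-- ===== PRECONDITION & SPEC =====
def Spec_isPerfectSquare (num : Int) (out : Bool) : Prop := out = isPerfectSquare_alt num
instance (num : Int) (out : Bool) : Decidable (Spec_isPerfectSquare num out) := by unfold Spec_isPerfectSquare; infer_instance

-- ===== CLAIM (what is proved, stated in full; the proofs are below) =====
def Claim_equal_isPerfectSquare : Prop := ∀ (num : Int), Dom_isPerfectSquare num → Spec_isPerfectSquare num (isPerfectSquare num)

-- ===== LEMMAS AND PROOFS =====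

-- binary-search loop correctness: returns true iff a square root of num lies in [bottom, top]
theorem pvALoop_iff (num top bottom : Int) (hb : 0 ≤ bottom) :
    pvALoop num top bottom = true ↔ ∃ k, bottom ≤ k ∧ k ≤ top ∧ k * k = num := by
  rw [pvALoop]
  by_cases h : bottom ≤ top
  · simp only [h, dif_pos]
    have hmid := PySem.Int.floordiv_two_mid_bounds (lo := bottom) (hi := top) h
    rw [Int.add_comm bottom top] at hmid
    set mid := PySem.Int.floordiv (top + bottom) 2 with hm
    by_cases h1 : mid * mid = num
    · simp only [h1, beq_self_eq_true, if_true, true_iff]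
      exact ⟨mid, hmid.1, hmid.2, h1⟩
    · simp only [beq_iff_eq, h1, if_false]
      by_cases h2 : mid * mid > num
      · rw [if_pos h2, pvALoop_iff num (mid - 1) bottom hb]
        constructor
        · rintro ⟨k, hk1, hk2, hk3⟩; exact ⟨k, hk1, by omega, hk3⟩
        · rintro ⟨k, hk1, hk2, hk3⟩
          refine ⟨k, hk1, ?_, hk3⟩
          -- k * k = num < mid * mid with 0 ≤ k, 0 ≤ mid forces k < mid
          by_contra hc
          have hkm : mid ≤ k := by omega
          have : mid * mid ≤ k * k :=
            mul_le_mul hkm hkm (by omega) (by omega)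
          omega
      · rw [if_neg h2, pvALoop_iff num top (mid + 1) (by omega)]
        constructor
        · rintro ⟨k, hk1, hk2, hk3⟩; exact ⟨k, by omega, hk2, hk3⟩
        · rintro ⟨k, hk1, hk2, hk3⟩
          refine ⟨k, ?_, hk2, hk3⟩
          by_contra hc
          have hkm : k ≤ mid := by omega
          have : k * k ≤ mid * mid :=
            mul_le_mul hkm hkm (by omega) (by omega)
          omega
  · simp only [h, dif_neg, not_false_iff, Bool.false_eq_true, false_iff]
    rintro ⟨k, hk1, hk2, _⟩; omega
termination_by (top + 1 - bottom).toNat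
decreasing_by
  · have hmid := PySem.Int.floordiv_two_mid_bounds (lo := bottom) (hi := top) h
    rw [Int.add_comm bottom top] at hmid
    omega
  · have hmid := PySem.Int.floordiv_two_mid_bounds (lo := bottom) (hi := top) h
    rw [Int.add_comm bottom top] at hmid
    omega

-- odd-subtraction loop correctness: started with increment i = 2*m+1, it succeeds iff
-- num is a partial sum of the odd numbers from 2*m+1 on, i.e. num = j*j + 2*m*j
theorem pvBLoop_iff (num m : Int) (hm : 0 ≤ m) (hi : (1:Int) ≤ 2 * m + 1) :
    pvBLoop num (2 * m + 1) hi = true ↔ ∃ j, 0 ≤ j ∧ num = j * j + 2 * m * j := by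
  rw [pvBLoop]
  by_cases h : num > 0
  · simp only [h, dif_pos]
    have h2 : (1:Int) ≤ 2 * (m + 1) + 1 := by omega
    have heq : pvBLoop (num - (2 * m + 1)) (2 * m + 1 + 2) (by omega)
         = pvBLoop (num - (2 * m + 1)) (2 * (m + 1) + 1) h2 := by
      congr 1; ring
    rw [heq, pvBLoop_iff (num - (2 * m + 1)) (m + 1) (by omega) h2]
    constructor
    · rintro ⟨j, hj, hnum⟩
      exact ⟨j + 1, by omega, by nlinarith⟩
    · rintro ⟨j, hj, hnum⟩
      have hj1 : 1 ≤ j := by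
        rcases lt_or_ge j 1 with hc | hc
        · have hj0 : j = 0 := by omega
          subst hj0; simp at hnum; omega
        · exact hc
      exact ⟨j - 1, by omega, by nlinarith⟩
  · simp only [h, dif_neg, not_false_iff, beq_iff_eq]
    constructor
    · intro h0; exact ⟨0, le_refl 0, by rw [h0]; ring⟩
    · rintro ⟨j, hj, hnum⟩
      have hjj : 0 ≤ j * j := mul_nonneg hj hj
      have hmj : 0 ≤ 2 * m * j := by positivity
      omega
termination_by num.toNat
decreasing_by omega

theorem isPerfectSquare_iff (num : Int) :
    isPerfectSquare num = true ↔ ∃ k, 0 ≤ k ∧ k * k = num := by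
  rw [isPerfectSquare, pvALoop_iff num _ 0 le_rfl]
  constructor
  · rintro ⟨k, hk1, _, hk3⟩; exact ⟨k, hk1, hk3⟩
  · rintro ⟨k, hk1, hk3⟩
    refine ⟨k, hk1, ?_, hk3⟩
    -- k ≤ num // 2 + 1 whenever k * k = num and 0 ≤ k
    rw [PySem.Int.floordiv_eq_ediv_of_pos (by norm_num)]
    have hnum0 : 0 ≤ num := by nlinarith
    rcases le_or_gt k 1 with h | h
    · omega
    · have : 2 * k ≤ num := by nlinarith
      omega

theorem isPerfectSquare_alt_iff (num : Int) :
    isPerfectSquare_alt num = true ↔ ∃ k, 0 ≤ k ∧ k * k = num := by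
  have h1 : (1:Int) ≤ 2 * 0 + 1 := by norm_num
  have heq : isPerfectSquare_alt num = pvBLoop num (2 * 0 + 1) h1 := by
    unfold isPerfectSquare_alt; norm_num
  rw [heq, pvBLoop_iff num 0 le_rfl h1]
  constructor
  · rintro ⟨j, hj, hnum⟩; exact ⟨j, hj, by omega⟩
  · rintro ⟨k, hk, hnum⟩; exact ⟨k, hk, by omega⟩

-- ===== VERDICT (by name: the statement is the Claim_ definition above) =====
theorem isPerfectSquare_spec : Claim_equal_isPerfectSquare := by
  intro num _
  unfold Spec_isPerfectSquare
  rw [Bool.eq_iff_iff, isPerfectSquare_iff, isPerfectSquare_alt_iff]
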